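-- pv_equiv track=rewrite | github.com/robinwettstaedt/codewars-kata | 7KYU/even_and_odd.py | even_and_odd
-- ===== SOURCE A (Python) =====
-- def even_and_odd(n):
--
--     list = [int(j) for j in str(n)]
--     ne = 0
--     no = 0
--
--     for x in list:
--         ne = ne*10+x if x % 2 == 0 else ne
--         no = no*10+x if x % 2 != 0 else no
--
--     return (ne, no)
-- ===== SOURCE B (Python) =====
-- def even_and_odd(n):
--     # pure-arithmetic re-implementation: peel decimal digits right-to-left,
--     # rebuilding the even and odd numbers with place-value multipliers
--     ne = no = 0
--     pe = po = 1
--     while n > 0: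
--         n, d = divmod(n, 10)
--         if d % 2 == 0:
--             ne += d * pe
--             pe *= 10
--         else:
--             no += d * po
--             po *= 10
--     return (ne, no)
-- ===== Notes on version B (the rewrite author's own statement) =====
-- stated objective: alternative
-- what changed: Replaces A's str(n) conversion + interleaved left-to-right fold over digit characters with a pure-arithmetic divmod loop that peels decimal digits right-to-left and rebuilds the two numbers with place-value multipliers; Pre_ excludes negative inputs, where A raises ValueError (int('-')).
import Mathlib
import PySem

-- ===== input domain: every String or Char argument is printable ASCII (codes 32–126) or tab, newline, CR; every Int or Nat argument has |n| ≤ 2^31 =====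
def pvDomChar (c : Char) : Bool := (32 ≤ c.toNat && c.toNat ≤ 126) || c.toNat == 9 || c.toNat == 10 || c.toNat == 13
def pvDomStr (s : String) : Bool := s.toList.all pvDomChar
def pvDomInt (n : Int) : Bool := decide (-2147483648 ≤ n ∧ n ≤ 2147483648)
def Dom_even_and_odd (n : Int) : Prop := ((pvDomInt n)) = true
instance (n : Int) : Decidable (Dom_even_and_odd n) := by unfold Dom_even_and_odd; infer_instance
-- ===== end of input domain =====

-- B replaces the str(n)-based interleaved fold with a pure-arithmetic divmod loop
-- (right-to-left digit peeling with place-value multipliers); equal return values on n ≥ 0.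

-- ===== PORT A =====
def even_and_odd (n : Int) : Int × Int :=
  -- list = [int(j) for j in str(n)]  (int('-') raises, so n < 0 is outside Pre_)
  let list := (PySem.Int.toChars n).map (fun j => (PySem.Int.ofChars? [j]).getD 0)
  list.foldl (fun (p : Int × Int) x =>
    (if PySem.Int.mod x 2 = 0 then p.1 * 10 + x else p.1,
     if ¬ (PySem.Int.mod x 2 = 0) then p.2 * 10 + x else p.2)) (0, 0)

-- ===== PORT B =====
-- the while loop of Source B as structural recursion on n (n strictly shrinks under // 10)
def evenOddGo (n ne no pe po : Int) : Int × Int :=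
  if h : 0 < n then
    let d := PySem.Int.mod n 10
    let n' := PySem.Int.floordiv n 10
    if PySem.Int.mod d 2 = 0 then
      evenOddGo n' (ne + d * pe) no (pe * 10) po
    else
      evenOddGo n' ne (no + d * po) pe (po * 10)
  else (ne, no)
  termination_by n.toNat
  decreasing_by
    all_goals
      simp only [PySem.Int.floordiv_eq_ediv_of_pos (show (0:Int) < 10 by norm_num)]
      omega

def even_and_odd_alt (n : Int) : Int × Int :=
  evenOddGo n 0 0 1 1

-- ===== PRECONDITION & SPEC =====
-- Pre_ excludes exactly the negative inputs: there str(n) starts with '-' and A's int('-') raises ValueError.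
def Pre_even_and_odd (n : Int) : Prop := 0 ≤ n
instance (n : Int) : Decidable (Pre_even_and_odd n) := by unfold Pre_even_and_odd; infer_instance
def pvWitness_even_and_odd : Int := 2046
def Spec_even_and_odd (n : Int) (out : Int × Int) : Prop := out = even_and_odd_alt n
instance (n : Int) (out : Int × Int) : Decidable (Spec_even_and_odd n out) := by unfold Spec_even_and_odd; infer_instance

-- ===== CLAIM (what is proved, stated in full; the proofs are below) =====
def Claim_equal_even_and_odd : Prop := ∀ (n : Int), Dom_even_and_odd n → Pre_even_and_odd n → Spec_even_and_odd n (even_and_odd n)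

-- ===== LEMMAS AND PROOFS =====

-- cast helpers: PySem.Int.mod/floordiv on a Nat cast, numeral divisors 10 and 2
lemma modC10 (a : Nat) : PySem.Int.mod (a : Int) 10 = ((a % 10 : Nat) : Int) := by
  simp [PySem.Int.mod_natCast a 10]

lemma modC2 (a : Nat) : PySem.Int.mod (a : Int) 2 = ((a % 2 : Nat) : Int) := by
  simp [PySem.Int.mod_natCast a 2]

lemma fdivC10 (a : Nat) : PySem.Int.floordiv (a : Int) 10 = ((a / 10 : Nat) : Int) := by
  exact_mod_cast PySem.Int.floordiv_natCast a 10

-- the digit characters of m, most significant first (recursion shape of Nat.toDigits 10)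
def digRec (m : Nat) : List Char :=
  if m < 10 then [Nat.digitChar m]
  else digRec (m / 10) ++ [Nat.digitChar (m % 10)]
  termination_by m
  decreasing_by omega

lemma toDigitsCore_eq (f : Nat) : ∀ (n : Nat) (l : List Char), n < f + 1 →
    Nat.toDigitsCore 10 (f + 1) n l = digRec n ++ l := by
  induction f with
  | zero =>
    intro n l hn
    interval_cases n
    simp [Nat.toDigitsCore, digRec]
  | succ f ih =>
    intro n l hn
    rw [Nat.toDigitsCore]
    by_cases h10 : n < 10
    · have : n / 10 = 0 := Nat.div_eq_of_lt h10
      simp [this, digRec, h10, Nat.mod_eq_of_lt h10]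
    · have hne : ¬ n / 10 = 0 := by omega
      simp only [hne, if_false]
      rw [ih (n / 10) _ (by omega)]
      conv_rhs => rw [digRec]
      simp [h10]

lemma toDigits_eq_digRec (m : Nat) : Nat.toDigits 10 m = digRec m := by
  have := toDigitsCore_eq m m [] (by omega)
  simpa [Nat.toDigits] using this

-- int(j) on a single digit character
lemma ofChars_digitChar (d : Nat) (hd : d < 10) :
    (PySem.Int.ofChars? [Nat.digitChar d]).getD 0 = (d : Int) := by
  interval_cases d <;> decide

-- the digit values of m, most significant first
def dvals (m : Nat) : List Int :=
  if m < 10 then [(m : Nat)]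
  else dvals (m / 10) ++ [((m % 10 : Nat) : Int)]
  termination_by m
  decreasing_by omega

lemma map_digRec (m : Nat) :
    (digRec m).map (fun j => (PySem.Int.ofChars? [j]).getD 0) = dvals m := by
  induction m using Nat.strong_induction_on with
  | _ m ih =>
    rw [digRec, dvals]
    by_cases h : m < 10
    · simp [h, ofChars_digitChar m h]
    · simp only [h, if_false, List.map_append, List.map_cons, List.map_nil]
      rw [ih (m / 10) (by omega), ofChars_digitChar (m % 10) (by omega)]

-- A's two accumulators, separated
def stepE (a x : Int) : Int := if PySem.Int.mod x 2 = 0 then a * 10 + x else a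
def stepO (a x : Int) : Int := if ¬ (PySem.Int.mod x 2 = 0) then a * 10 + x else a
def specE (m : Nat) : Int := (dvals m).foldl stepE 0
def specO (m : Nat) : Int := (dvals m).foldl stepO 0

lemma specE_zero : specE 0 = 0 := by
  simp only [specE]; rw [dvals]; decide

lemma specO_zero : specO 0 = 0 := by
  simp only [specO]; rw [dvals]; decide

lemma step_last (a : Int) (d : Nat) :
    (stepE a ((d : Nat) : Int) = if d % 2 = 0 then a * 10 + (d : Int) else a) ∧
    (stepO a ((d : Nat) : Int) = if d % 2 = 0 then a else a * 10 + (d : Int)) := by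
  have hc : (PySem.Int.mod ((d : Nat) : Int) 2 = 0) ↔ d % 2 = 0 := by
    rw [modC2 d]; exact_mod_cast Iff.rfl
  constructor
  · simp only [stepE]
    by_cases he : d % 2 = 0
    · rw [if_pos (hc.mpr he), if_pos he]
    · rw [if_neg (fun h => he (hc.mp h)), if_neg he]
  · simp only [stepO]
    by_cases he : d % 2 = 0
    · rw [if_neg (not_not_intro (hc.mpr he)), if_pos he]
    · rw [if_pos (fun h => he (hc.mp h)), if_neg he]

lemma specE_rec (m : Nat) (_hm : 0 < m) :
    specE m = if m % 10 % 2 = 0 then specE (m / 10) * 10 + ((m % 10 : Nat) : Int)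
              else specE (m / 10) := by
  by_cases h : m < 10
  · have h0 : m / 10 = 0 := Nat.div_eq_of_lt h
    have hmd : m % 10 = m := Nat.mod_eq_of_lt h
    simp only [specE]
    rw [dvals, if_pos h, h0, hmd]
    simp only [List.foldl_cons, List.foldl_nil]
    have hz : (dvals 0).foldl stepE 0 = 0 := by rw [dvals]; decide
    rw [hz, (step_last 0 m).1]
  · simp only [specE]
    rw [dvals, if_neg h, List.foldl_append]
    simp only [List.foldl_cons, List.foldl_nil]
    exact (step_last _ (m % 10)).1

lemma specO_rec (m : Nat) (_hm : 0 < m) :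
    specO m = if m % 10 % 2 = 0 then specO (m / 10)
              else specO (m / 10) * 10 + ((m % 10 : Nat) : Int) := by
  by_cases h : m < 10
  · have h0 : m / 10 = 0 := Nat.div_eq_of_lt h
    have hmd : m % 10 = m := Nat.mod_eq_of_lt h
    simp only [specO]
    rw [dvals, if_pos h, h0, hmd]
    simp only [List.foldl_cons, List.foldl_nil]
    have hz : (dvals 0).foldl stepO 0 = 0 := by rw [dvals]; decide
    rw [hz, (step_last 0 m).2]
  · simp only [specO]
    rw [dvals, if_neg h, List.foldl_append]
    simp only [List.foldl_cons, List.foldl_nil]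
    exact (step_last _ (m % 10)).2

lemma evenOddGo_spec (m : Nat) : ∀ ne no pe po : Int,
    evenOddGo (m : Int) ne no pe po = (ne + specE m * pe, no + specO m * po) := by
  induction m using Nat.strong_induction_on with
  | _ m ih =>
    intro ne no pe po
    rw [evenOddGo]
    by_cases hm : 0 < m
    · have hpos : (0 : Int) < (m : Int) := by exact_mod_cast hm
      rw [dif_pos hpos]
      simp only [modC10 m, fdivC10 m, modC2 (m % 10)]
      rw [specE_rec m hm, specO_rec m hm]
      by_cases he : m % 10 % 2 = 0
      · rw [if_pos (by exact_mod_cast he : ((m % 10 % 2 : Nat) : Int) = 0),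
            if_pos he, if_pos he, ih (m / 10) (by omega)]
        rw [Prod.mk.injEq]; constructor <;> ring
      · rw [if_neg (fun hc => he (by exact_mod_cast hc)),
            if_neg he, if_neg he, ih (m / 10) (by omega)]
        rw [Prod.mk.injEq]; constructor <;> ring
    · have hz : m = 0 := by omega
      subst hz
      rw [dif_neg (by norm_num)]
      simp [specE_zero, specO_zero]

lemma even_and_odd_eq_spec (n : Int) (hn : 0 ≤ n) :
    even_and_odd n = (specE n.toNat, specO n.toNat) := by
  have hchars : PySem.Int.toChars n = Nat.toDigits 10 n.toNat := by
    simp [PySem.Int.toChars, not_lt.mpr hn]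
  rw [even_and_odd]
  simp only [hchars, toDigits_eq_digRec, map_digRec]
  exact PySem.List.foldl_prod_mk stepE stepO (dvals n.toNat) 0 0

-- ===== VERDICT (by name: the statement is the Claim_ definition above) =====
theorem even_and_odd_spec : Claim_equal_even_and_odd := by
  intro n _ hpre
  unfold Spec_even_and_odd even_and_odd_alt
  rw [even_and_odd_eq_spec n hpre]
  have hcast : ((n.toNat : Nat) : Int) = n := Int.toNat_of_nonneg hpre
  have hgo := evenOddGo_spec n.toNat 0 0 1 1
  rw [hcast] at hgo
  rw [hgo]
  simp
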